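-- pv_equiv track=rewrite | github.com/jacobzhuu/DeepSearch | services/orchestrator/app/claims/drafting.py | _has_explanatory_claim_verb
-- ===== SOURCE A (Python) =====
-- def _has_explanatory_claim_verb(lower_statement: str) -> bool:
--     return any(
--         f" {verb} " in f" {lower_statement} "
--         for verb in (
--             "aggregates",
--             "are",
--             "functions",
--             "is",
--             "removes",
--             "returns",
--             "sends",
--             "stores",
--             "supports",
--             "uses",
--             "works",
--         )
--     )
-- ===== SOURCE B (Python) =====
-- _EXPLANATORY_VERBS = frozenset((
--     "aggregates", "are", "functions", "is", "removes", "returns",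
--     "sends", "stores", "supports", "uses", "works",
-- ))
--
--
-- def _has_explanatory_claim_verb(lower_statement: str) -> bool:
--     # One left-to-right pass: cut the statement at single spaces and test each
--     # word against the verb set, instead of 11 substring scans over a padded copy.
--     word = []
--     for ch in lower_statement:
--         if ch == ' ':
--             if ''.join(word) in _EXPLANATORY_VERBS:
--                 return True
--             word = []
--         else:
--             word.append(ch)
--     return ''.join(word) in _EXPLANATORY_VERBS
-- ===== Notes on version B (the rewrite author's own statement) =====
-- stated objective: alternative
-- what changed: Replaced the 11 per-verb substring scans over a space-padded copy of the statement by a single left-to-right pass that cuts the statement at single spaces and tests each word against a frozenset of the verbs.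
import Mathlib
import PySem

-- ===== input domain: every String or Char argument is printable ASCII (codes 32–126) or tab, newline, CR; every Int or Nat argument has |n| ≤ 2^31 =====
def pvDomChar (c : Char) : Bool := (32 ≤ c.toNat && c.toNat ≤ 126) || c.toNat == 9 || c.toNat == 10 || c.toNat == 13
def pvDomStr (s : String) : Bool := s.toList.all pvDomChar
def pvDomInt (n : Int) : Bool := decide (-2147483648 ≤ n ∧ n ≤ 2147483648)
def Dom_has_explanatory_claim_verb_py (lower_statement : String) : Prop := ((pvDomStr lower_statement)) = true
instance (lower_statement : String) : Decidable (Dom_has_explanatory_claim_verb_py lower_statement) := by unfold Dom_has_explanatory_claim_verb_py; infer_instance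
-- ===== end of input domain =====

-- B replaces A's 11 per-verb substring scans over a padded copy by one left-to-right
-- tokenizing pass (split at single spaces) with a verb-set membership test per word.

-- ===== PORT A =====
-- the Python tuple of verbs
def pyVerbs : List String :=
  ["aggregates", "are", "functions", "is", "removes", "returns",
   "sends", "stores", "supports", "uses", "works"]

-- f" {x} " is ported exactly at the char-list level: (" " + x + " ").toList = ' ' :: x.toList ++ [' ']
def has_explanatory_claim_verb_py (lower_statement : String) : Bool :=
  pyVerbs.any (fun verb =>
    PySem.Chars.isIn (' ' :: (verb.toList ++ [' '])) (' ' :: (lower_statement.toList ++ [' '])))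

-- ===== PORT B =====
-- the frozenset of verbs (distinct string literals, kept as char lists)
def pvVerbSet : List (List Char) :=
  ["aggregates".toList, "are".toList, "functions".toList, "is".toList, "removes".toList,
   "returns".toList, "sends".toList, "stores".toList, "supports".toList, "uses".toList,
   "works".toList]

-- the for-loop of Source B: `word` is the current word accumulated in reverse
def altGo : List Char → List Char → Bool
  | [], word => pvVerbSet.contains word.reverse
  | c :: rest, word =>
    if c = ' ' then (pvVerbSet.contains word.reverse || altGo rest [])
    else altGo rest (c :: word)

def has_explanatory_claim_verb_py_alt (lower_statement : String) : Bool :=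
  altGo lower_statement.toList []

-- ===== PRECONDITION & SPEC =====
def Spec_has_explanatory_claim_verb_py (lower_statement : String) (out : Bool) : Prop := out = has_explanatory_claim_verb_py_alt lower_statement
instance (lower_statement : String) (out : Bool) : Decidable (Spec_has_explanatory_claim_verb_py lower_statement out) := by unfold Spec_has_explanatory_claim_verb_py; infer_instance

-- ===== CLAIM (what is proved, stated in full; the proofs are below) =====
def Claim_equal_has_explanatory_claim_verb_py : Prop := ∀ (lower_statement : String), Dom_has_explanatory_claim_verb_py lower_statement → Spec_has_explanatory_claim_verb_py lower_statement (has_explanatory_claim_verb_py lower_statement)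

-- ===== LEMMAS AND PROOFS =====

-- the tokens of s when cut at every single space (Python s.split(' '))
def toksNA : List Char → List (List Char)
  | [] => [[]]
  | c :: r => if c = ' ' then [] :: toksNA r else (c :: (toksNA r).headI) :: (toksNA r).tail

lemma toksNA_cons_shape (s : List Char) : toksNA s = (toksNA s).headI :: (toksNA s).tail := by
  cases s with
  | nil => simp [toksNA]
  | cons c r => by_cases hc : c = ' ' <;> simp [toksNA, hc]

-- v++[' '] is a prefix of r++[' '] iff v is exactly the first token of r
lemma prefix_pad_iff (v : List Char) (hsp : ' ' ∉ v) :
    ∀ r : List Char, (v ++ [' ']) <+: (r ++ [' ']) ↔ v = (toksNA r).headI := by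
  induction v with
  | nil =>
    intro r
    cases r with
    | nil => simp [toksNA]
    | cons c r' =>
      by_cases hc : c = ' ' <;>
        simp [toksNA, hc, List.cons_prefix_cons, eq_comm]
  | cons h v' ih =>
    have hh : h ≠ ' ' := by intro he; exact hsp (he ▸ List.mem_cons_self)
    have hsp' : ' ' ∉ v' := fun hm => hsp (List.mem_cons_of_mem _ hm)
    intro r
    cases r with
    | nil =>
      simp only [List.nil_append, List.cons_append, List.cons_prefix_cons, toksNA]
      constructor
      · rintro ⟨he, _⟩; exact absurd he hh
      · intro he; simp at he
    | cons c r' =>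
      by_cases hc : c = ' '
      · subst hc
        simp [toksNA, List.cons_prefix_cons, hh]
      · simp only [List.cons_append, List.cons_prefix_cons, toksNA, if_neg hc]
        rw [ih hsp' r']
        rw [toksNA_cons_shape r']
        simp

-- occurrences of " v " strictly inside r++" " are exactly the non-first tokens of r
lemma infix_tail_iff (v : List Char) (hsp : ' ' ∉ v) :
    ∀ r : List Char, (' ' :: (v ++ [' '])) <:+: (r ++ [' ']) ↔ v ∈ (toksNA r).tail := by
  intro r
  induction r with
  | nil =>
    simp only [List.nil_append, toksNA, List.tail_cons, List.not_mem_nil, iff_false]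
    intro h
    have := h.length_le
    simp at this
  | cons c r' ih =>
    rw [List.cons_append, List.infix_cons_iff]
    by_cases hc : c = ' '
    · subst hc
      rw [List.cons_prefix_cons]
      have h1 := prefix_pad_iff v hsp r'
      have ht : toksNA (' ' :: r') = [] :: toksNA r' := by simp [toksNA]
      rw [ht, List.tail_cons, toksNA_cons_shape r', List.mem_cons]
      constructor
      · rintro (⟨-, hp⟩ | hi)
        · exact Or.inl (h1.mp hp)
        · exact Or.inr (ih.mp hi)
      · rintro (he | hm)
        · exact Or.inl ⟨rfl, h1.mpr he⟩
        · exact Or.inr (ih.mpr hm)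
    · have hno : ¬ ((' ' :: (v ++ [' '])) <+: (c :: (r' ++ [' ']))) := by
        rw [List.cons_prefix_cons]
        rintro ⟨he, -⟩; exact hc he.symm
      simp only [toksNA, if_neg hc, List.tail_cons]
      constructor
      · rintro (hp | hi)
        · exact absurd hp hno
        · exact ih.mp hi
      · intro hm; exact Or.inr (ih.mpr hm)

-- " v " occurs in the padded statement iff v is one of its space-cut tokens
lemma padded_infix_iff (v : List Char) (hsp : ' ' ∉ v) (s : List Char) :
    PySem.Chars.isIn (' ' :: (v ++ [' '])) (' ' :: (s ++ [' '])) = true ↔ v ∈ toksNA s := by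
  rw [PySem.Chars.isIn_iff_infix, List.infix_cons_iff, List.cons_prefix_cons]
  rw [prefix_pad_iff v hsp s, infix_tail_iff v hsp s]
  rw [toksNA_cons_shape s, List.mem_cons]
  simp

-- Source B's loop tests exactly the tokens of word.reverse ++ rest against the verb set
lemma altGo_eq (s : List Char) : ∀ word : List Char,
    altGo s word =
      ((word.reverse ++ (toksNA s).headI) :: (toksNA s).tail).any (fun t => pvVerbSet.contains t) := by
  induction s with
  | nil => intro word; simp [altGo, toksNA]
  | cons c r ih =>
    intro word
    by_cases hc : c = ' '
    · subst hc
      have ht : toksNA (' ' :: r) = [] :: ((toksNA r).headI :: (toksNA r).tail) := by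
        rw [← toksNA_cons_shape r]; simp [toksNA]
      rw [show altGo (' ' :: r) word = (pvVerbSet.contains word.reverse || altGo r []) from rfl,
        ih [], ht]
      simp [List.any_cons]
    · have ht : toksNA (c :: r) = (c :: (toksNA r).headI) :: (toksNA r).tail := by
        simp [toksNA, hc]
      simp only [altGo, if_neg hc]
      rw [ih (c :: word), ht]
      simp

-- ===== VERDICT (by name: the statement is the Claim_ definition above) =====
theorem has_explanatory_claim_verb_py_spec : Claim_equal_has_explanatory_claim_verb_py := by
  intro s _
  unfold Spec_has_explanatory_claim_verb_py
  unfold has_explanatory_claim_verb_py has_explanatory_claim_verb_py_alt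
  rw [altGo_eq s.toList []]
  rw [Bool.eq_iff_iff]
  rw [List.any_eq_true, List.any_eq_true]
  simp only [pyVerbs]
  constructor
  · rintro ⟨v, hv, hin⟩
    refine ⟨v.toList, ?_, ?_⟩
    · have hsp : ' ' ∉ v.toList := by
        fin_cases hv <;> decide
      have := (padded_infix_iff v.toList hsp s.toList).mp hin
      rw [toksNA_cons_shape s.toList, List.mem_cons] at this
      rcases this with he | hm
      · rw [← he]; simp
      · exact List.mem_cons_of_mem _ hm
    · fin_cases hv <;> decide
  · rintro ⟨t, ht, htv⟩
    have hmem : t ∈ pvVerbSet := by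
      simpa using htv
    simp only [pvVerbSet, List.mem_cons, List.not_mem_nil, or_false] at hmem
    have htok : t ∈ toksNA s.toList := by
      rw [toksNA_cons_shape s.toList, List.mem_cons]
      rcases List.mem_cons.mp ht with he | hm
      · left
        rw [he]; simp
      · right; exact hm
    rcases hmem with h|h|h|h|h|h|h|h|h|h|h <;>
      subst h <;>
      exact ⟨_, by simp, (padded_infix_iff _ (by decide) s.toList).mpr htok⟩
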